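-- pv_equiv track=rewrite | github.com/bionlproc/Raredis | Pipeline/preprocess/preprocess_dev.py | create_dict_deleting_discont_morethan2
-- ===== SOURCE A (Python) =====
-- def create_dict_deleting_discont_morethan2(ner_lists_raw, ner_lists):
--     # All indices of discontinuous entities with more than two fragments
--     ner_lists_raw_removed = []
--     for idx in range(len(ner_lists_raw)):
--         if len(ner_lists_raw[idx]) > 3:
--             ner_lists_raw_removed.append(idx)
--
--     # Create a dictionary to store the names and associated lists
--     dict_ner_lists_raw = {f"T{i + 1}": ner_lists_raw[i] for i in range(len(ner_lists_raw))}
--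
--     # Remove the elements in ner_lists_raw_removed from the dictionary
--     for idx in ner_lists_raw_removed:
--         del dict_ner_lists_raw[f"T{idx + 1}"]
--
--     # Convert the dictionary items to a list
--     items = list(dict_ner_lists_raw.items())
--
--     # Create a new dictionary after deleting discontinuous entities with more than two fragments
--     new_dict_ner_lists = {}
--     for k in range(len(ner_lists)):
--         new_dict_ner_lists[items[k][0]] = ner_lists[k]
--
--     return new_dict_ner_lists
-- ===== SOURCE B (Python) =====
-- def create_dict_deleting_discont_morethan2(ner_lists_raw, ner_lists):
--     # One pass: collect the surviving keys directly, then pair them with ner_lists.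
--     kept_keys = [f"T{i + 1}" for i, frags in enumerate(ner_lists_raw) if len(frags) <= 3]
--     return dict(zip(kept_keys, ner_lists))
-- ===== Notes on version B (the rewrite author's own statement) =====
-- stated objective: simpler
-- what changed: B collects the surviving keys in one filtering pass over ner_lists_raw and zips them with ner_lists, replacing A's build-a-dict-of-all-keys, delete-pass and item-indexing re-insertion loop.
import Mathlib
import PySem

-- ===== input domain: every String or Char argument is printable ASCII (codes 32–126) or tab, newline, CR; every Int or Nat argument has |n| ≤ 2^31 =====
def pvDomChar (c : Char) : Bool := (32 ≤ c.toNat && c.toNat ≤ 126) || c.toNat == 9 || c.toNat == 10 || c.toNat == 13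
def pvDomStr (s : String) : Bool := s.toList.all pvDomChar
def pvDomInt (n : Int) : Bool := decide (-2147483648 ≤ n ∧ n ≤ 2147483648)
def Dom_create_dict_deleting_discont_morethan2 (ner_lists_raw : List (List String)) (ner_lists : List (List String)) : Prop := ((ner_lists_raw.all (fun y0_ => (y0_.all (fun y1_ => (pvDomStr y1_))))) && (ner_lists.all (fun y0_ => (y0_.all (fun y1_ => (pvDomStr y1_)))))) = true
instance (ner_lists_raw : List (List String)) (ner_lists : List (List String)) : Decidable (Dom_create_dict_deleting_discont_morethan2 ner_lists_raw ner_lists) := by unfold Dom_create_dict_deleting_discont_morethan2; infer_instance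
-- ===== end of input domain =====

-- B builds the surviving keys in one filtering pass and zips them with ner_lists, instead of
-- A's build-all-keys dict followed by a deletion pass and an item-indexing re-insertion loop.
-- Equivalence is proved on the return value; neither version mutates its arguments.

-- f"T{i + 1}" (shared key helper; String.ofList keeps it kernel-transparent)
def pvKeyT (i : Int) : String := String.ofList ('T' :: PySem.Int.toChars (i + 1))

-- ===== PORT A =====
def create_dict_deleting_discont_morethan2 (ner_lists_raw : List (List String)) (ner_lists : List (List String)) : List (String × List String) :=
  -- ner_lists_raw_removed = indices with more than three fragments
  let removed : List Int :=
    (PySem.List.pyRange 0 (ner_lists_raw.length : Int) 1).foldl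
      (fun acc idx => if 3 < (PySem.List.pyGetD ner_lists_raw idx []).length then acc ++ [idx] else acc) []
  -- dict_ner_lists_raw = {f"T{i+1}": ner_lists_raw[i] for i in range(len(ner_lists_raw))}
  let dict_raw : PySem.Dict String (List String) :=
    (PySem.List.pyRange 0 (ner_lists_raw.length : Int) 1).foldl
      (fun d i => d.insert (pvKeyT i) (PySem.List.pyGetD ner_lists_raw i [])) PySem.Dict.empty
  -- for idx in removed: del dict_raw[f"T{idx+1}"]
  let dict_raw2 : PySem.Dict String (List String) :=
    removed.foldl (fun d idx => d.erase (pvKeyT idx)) dict_raw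
  let items := dict_raw2.items
  -- new_dict_ner_lists[items[k][0]] = ner_lists[k]   (items[k] in range by Pre_)
  let newd : PySem.Dict String (List String) :=
    (PySem.List.pyRange 0 (ner_lists.length : Int) 1).foldl
      (fun d k => d.insert (PySem.List.pyGetD items k ("", [])).1 (PySem.List.pyGetD ner_lists k [])) PySem.Dict.empty
  newd.items

-- ===== PORT B =====
def create_dict_deleting_discont_morethan2_alt (ner_lists_raw : List (List String)) (ner_lists : List (List String)) : List (String × List String) :=
  let kept_keys : List String :=
    ((PySem.List.enumerate ner_lists_raw).filter (fun p => decide (p.2.length ≤ 3))).map (fun p => pvKeyT p.1)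
  (PySem.Dict.ofList (kept_keys.zip ner_lists)).items

-- ===== PRECONDITION & SPEC =====
-- Pre_ excludes exactly the inputs where A raises IndexError: ner_lists longer than the list of
-- surviving (≤ 3 fragments) entities.
def Pre_create_dict_deleting_discont_morethan2 (ner_lists_raw : List (List String)) (ner_lists : List (List String)) : Prop :=
  ner_lists.length ≤ (ner_lists_raw.filter (fun l => decide (l.length ≤ 3))).length
instance (ner_lists_raw : List (List String)) (ner_lists : List (List String)) : Decidable (Pre_create_dict_deleting_discont_morethan2 ner_lists_raw ner_lists) := by unfold Pre_create_dict_deleting_discont_morethan2; infer_instance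
def pvWitness_create_dict_deleting_discont_morethan2 : List (List String) × List (List String) := ([["a"], ["b", "c", "d", "e"]], [["z"]])

def Spec_create_dict_deleting_discont_morethan2 (ner_lists_raw : List (List String)) (ner_lists : List (List String)) (out : List (String × List String)) : Prop := out = create_dict_deleting_discont_morethan2_alt ner_lists_raw ner_lists
instance (ner_lists_raw : List (List String)) (ner_lists : List (List String)) (out : List (String × List String)) : Decidable (Spec_create_dict_deleting_discont_morethan2 ner_lists_raw ner_lists out) := by unfold Spec_create_dict_deleting_discont_morethan2; infer_instance

-- ===== CLAIM (what is proved, stated in full; the proofs are below) =====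
def Claim_equal_create_dict_deleting_discont_morethan2 : Prop := ∀ (ner_lists_raw : List (List String)) (ner_lists : List (List String)), Dom_create_dict_deleting_discont_morethan2 ner_lists_raw ner_lists → Pre_create_dict_deleting_discont_morethan2 ner_lists_raw ner_lists → Spec_create_dict_deleting_discont_morethan2 ner_lists_raw ner_lists (create_dict_deleting_discont_morethan2 ner_lists_raw ner_lists)
-- ===== LEMMAS AND PROOFS =====

-- digitChar is injective below 10
lemma pv_digitChar_inj {a b : Nat} (ha : a < 10) (hb : b < 10) (h : Nat.digitChar a = Nat.digitChar b) : a = b := by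
  interval_cases a <;> interval_cases b <;> simp_all [Nat.digitChar]

-- decimal printing is injective
lemma pv_toDigits_inj : ∀ a c : Nat, Nat.toDigits 10 a = Nat.toDigits 10 c → a = c := by
  intro a
  induction a using Nat.strong_induction_on with
  | _ a ih =>
    intro c h
    by_cases hA : a < 10 <;> by_cases hB : c < 10
    · rw [Nat.toDigits_of_lt_base hA, Nat.toDigits_of_lt_base hB] at h
      simp only [List.cons.injEq, and_true] at h
      exact pv_digitChar_inj hA hB h
    · exfalso
      have hlen : (Nat.toDigits 10 a).length ≤ 1 := by
        rw [(Nat.length_toDigits_le_iff (by norm_num) (by norm_num) : (Nat.toDigits 10 a).length ≤ 1 ↔ a < 10 ^ 1)]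
        simpa using hA
      have hlenb : ¬ (Nat.toDigits 10 c).length ≤ 1 := by
        rw [(Nat.length_toDigits_le_iff (by norm_num) (by norm_num) : (Nat.toDigits 10 c).length ≤ 1 ↔ c < 10 ^ 1)]
        simpa using hB
      exact hlenb (h ▸ hlen)
    · exfalso
      have hlen : (Nat.toDigits 10 c).length ≤ 1 := by
        rw [(Nat.length_toDigits_le_iff (by norm_num) (by norm_num) : (Nat.toDigits 10 c).length ≤ 1 ↔ c < 10 ^ 1)]
        simpa using hB
      have hlena : ¬ (Nat.toDigits 10 a).length ≤ 1 := by
        rw [(Nat.length_toDigits_le_iff (by norm_num) (by norm_num) : (Nat.toDigits 10 a).length ≤ 1 ↔ a < 10 ^ 1)]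
        simpa using hA
      exact hlena (h ▸ hlen)
    · rw [Nat.toDigits_of_base_le (n := a) (by norm_num) (by omega),
        Nat.toDigits_of_base_le (n := c) (by norm_num) (by omega)] at h
      have hp := List.append_inj h (by
        have := congrArg List.length h
        simpa using this)
      have h1 : a / 10 = c / 10 := ih (a / 10) (by omega) _ hp.1
      have h2 : a % 10 = c % 10 := by
        have := hp.2
        simp only [List.cons.injEq, and_true] at this
        exact pv_digitChar_inj (Nat.mod_lt _ (by norm_num)) (Nat.mod_lt _ (by norm_num)) this
      omega

lemma pv_keyT_inj {i j : Int} (hi : 0 ≤ i) (hj : 0 ≤ j) (h : pvKeyT i = pvKeyT j) : i = j := by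
  unfold pvKeyT at h
  have h2 : PySem.Int.toChars (i + 1) = PySem.Int.toChars (j + 1) := by
    have h1 := congrArg String.toList h
    simp only [String.toList_ofList, List.cons.injEq, true_and] at h1
    exact h1
  unfold PySem.Int.toChars at h2
  rw [if_neg (by omega), if_neg (by omega)] at h2
  have := pv_toDigits_inj _ _ h2
  omega

-- folding Dict.erase is filtering the items by "key not among the erased ones"
lemma pv_foldl_erase {κ ν : Type} [BEq κ] (key : Int → κ) :
    ∀ (rem : List Int) (d : PySem.Dict κ ν),
    (rem.foldl (fun d idx => d.erase (key idx)) d).items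
      = d.items.filter (fun p => !(rem.any (fun idx => p.1 == key idx))) := by
  intro rem
  induction rem with
  | nil => intro d; simp
  | cons r rs ih =>
    intro d
    rw [List.foldl_cons, ih]
    show ((d.erase (key r)).items).filter _ = _
    simp only [PySem.Dict.erase, List.filter_filter]
    apply List.filter_congr
    intro p _
    simp only [List.any_cons, Bool.not_or]
    rw [Bool.and_comm]

-- indexed filtering of range = filtering the list itself (values side)
lemma pv_range_filter_map {α β : Type} (p : α → Bool) (g : α → β) (d : α) :
    ∀ (xs : List α),
    (((List.range xs.length).filter (fun k => p (xs.getD k d))).map (fun k => g (xs.getD k d)))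
      = (xs.filter p).map g := by
  intro xs
  induction xs with
  | nil => simp
  | cons x t ih =>
    rw [List.length_cons, List.range_succ_eq_map, List.filter_cons]
    have htail : ((List.map Nat.succ (List.range t.length)).filter
          (fun k => p ((x :: t).getD k d))).map (fun k => g ((x :: t).getD k d))
        = ((List.range t.length).filter (fun k => p (t.getD k d))).map (fun k => g (t.getD k d)) := by
      rw [List.filter_map, List.map_map]
      simp only [Function.comp_def, Nat.succ_eq_add_one, List.getD_cons_succ]
    by_cases hx : p x
    · rw [if_pos (by simpa using hx), List.map_cons, htail, ih,
        List.filter_cons_of_pos (by simpa using hx), List.map_cons]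
      simp
    · rw [if_neg (by simpa using hx), htail, ih, List.filter_cons_of_neg (by simpa using hx)]

-- ===== VERDICT (by name: the statement is the Claim_ definition above) =====
theorem create_dict_deleting_discont_morethan2_spec : Claim_equal_create_dict_deleting_discont_morethan2 := by
  intro raw nl _ hpre
  unfold Pre_create_dict_deleting_discont_morethan2 at hpre
  unfold Spec_create_dict_deleting_discont_morethan2 create_dict_deleting_discont_morethan2
    create_dict_deleting_discont_morethan2_alt
  dsimp only
  -- ---- the canonical kept-index list ----
  have hkeptnd : ((List.range raw.length).filter (fun k => decide ((raw.getD k []).length ≤ 3))).Nodup :=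
    List.Nodup.filter _ List.nodup_range
  have hkknd : (((List.range raw.length).filter (fun k => decide ((raw.getD k []).length ≤ 3))).map
      (fun k : Nat => pvKeyT (k : Int))).Nodup := by
    refine List.Nodup.map_on (f := fun k : Nat => pvKeyT (k : Int)) ?_ hkeptnd
    intro x _ y _ hxy
    exact_mod_cast pv_keyT_inj (Int.natCast_nonneg x) (Int.natCast_nonneg y) hxy
  have hkklen : (((List.range raw.length).filter (fun k => decide ((raw.getD k []).length ≤ 3))).map
        (fun k : Nat => pvKeyT (k : Int))).length
      = (raw.filter (fun l => decide (l.length ≤ 3))).length := by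
    have h2 := congrArg List.length
      (pv_range_filter_map (fun l => decide (l.length ≤ 3)) (fun l => l) [] raw)
    simpa using h2
  -- ---- step 1: removed = filter over the range ----
  rw [PySem.List.foldl_append_ite_eq_filter (fun idx => 3 < (PySem.List.pyGetD raw idx []).length),
    List.nil_append]
  -- ---- step 2: erase-fold = filter of the built items ----
  rw [pv_foldl_erase]
  -- ---- step 3: built items ----
  rw [PySem.Dict.items_foldl_insert_fresh _ pvKeyT (fun i => PySem.List.pyGetD raw i [])
      PySem.Dict.empty (fun a _ => PySem.Dict.contains_empty _) ?ndA]
  case ndA =>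
    rw [PySem.List.pyRange_zero_natCast, List.map_map]
    refine List.Nodup.map_on (f := fun k : Nat => pvKeyT (k : Int)) ?_ List.nodup_range
    intro x _ y _ hxy
    exact_mod_cast pv_keyT_inj (Int.natCast_nonneg x) (Int.natCast_nonneg y) hxy
  rw [show (PySem.Dict.empty : PySem.Dict String (List String)).items = [] from rfl, List.nil_append]
  -- ---- step 4: the filtered item list, in Nat form ----
  have hitems : (List.filter
        (fun p => !(List.filter (fun x => decide (3 < (PySem.List.pyGetD raw x []).length))
              (PySem.List.pyRange 0 (raw.length : Int))).any (fun idx => p.1 == pvKeyT idx))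
        (List.map (fun a => (pvKeyT a, PySem.List.pyGetD raw a [])) (PySem.List.pyRange 0 (raw.length : Int))))
      = ((List.range raw.length).filter (fun k => decide ((raw.getD k []).length ≤ 3))).map
          (fun k : Nat => (pvKeyT (k : Int), raw.getD k [])) := by
    rw [List.filter_map, PySem.List.pyRange_zero_natCast, List.filter_map, List.map_map]
    have hfc : ∀ k ∈ List.range raw.length,
        (((fun p => !(List.filter (fun x => decide (3 < (PySem.List.pyGetD raw x []).length))
              (List.map (fun k : Nat => (k : Int)) (List.range raw.length))).any (fun idx => p.1 == pvKeyT idx)) ∘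
          (fun a => (pvKeyT a, PySem.List.pyGetD raw a []))) ∘ (fun k : Nat => (k : Int))) k
        = decide ((raw.getD k []).length ≤ 3) := by
      intro k hk
      have hk' : k < raw.length := List.mem_range.mp hk
      simp only [Function.comp_apply]
      have hany : ((List.filter (fun x => decide (3 < (PySem.List.pyGetD raw x []).length))
            (List.map (fun k : Nat => (k : Int)) (List.range raw.length))).any
              (fun idx => (pvKeyT (k : Int), PySem.List.pyGetD raw (k : Int) []).1 == pvKeyT idx))
          = decide (3 < (raw.getD k []).length) := by
        by_cases h3 : 3 < (raw.getD k []).length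
        · simp only [h3, decide_true]
          rw [List.any_eq_true]
          refine ⟨(k : Int), List.mem_filter.mpr ⟨List.mem_map.mpr ⟨k, hk, rfl⟩, ?_⟩, by simp⟩
          rw [PySem.List.pyGetD_natCast]
          simpa using h3
        · simp only [h3, decide_false]
          rw [List.any_eq_false]
          intro idx hidx
          have hmem := List.mem_of_mem_filter hidx
          have hP := List.of_mem_filter hidx
          have h0 : 0 ≤ idx := by
            obtain ⟨j, _, rfl⟩ := List.mem_map.mp hmem
            exact Int.natCast_nonneg j
          intro hbeq
          have heq : pvKeyT (k : Int) = pvKeyT idx := by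
            simpa using hbeq
          have : (k : Int) = idx := pv_keyT_inj (Int.natCast_nonneg k) h0 heq
          rw [← this, PySem.List.pyGetD_natCast] at hP
          simp only [decide_eq_true_eq] at hP
          exact h3 (by simpa using hP)
      rw [hany]
      by_cases h3 : (raw.getD k []).length ≤ 3
      · rw [decide_eq_true h3, decide_eq_false (by omega : ¬ 3 < (raw.getD k []).length)]
        rfl
      · rw [decide_eq_false h3, decide_eq_true (by omega : 3 < (raw.getD k []).length)]
        rfl
    rw [List.filter_congr hfc]
    simp [Function.comp_def, PySem.List.pyGetD_natCast]
  rw [hitems]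
  -- ---- B side: kept_keys is the canonical key list ----
  have hkeys : ((PySem.List.enumerate raw).filter (fun p => decide (p.2.length ≤ 3))).map (fun p => pvKeyT p.1)
      = ((List.range raw.length).filter (fun k => decide ((raw.getD k []).length ≤ 3))).map
          (fun k : Nat => pvKeyT (k : Int)) := by
    rw [PySem.List.enumerate_eq_map_pyRange raw []]
    simp only [PySem.List.len]
    rw [List.filter_map, PySem.List.pyRange_zero_natCast, List.filter_map, List.map_map, List.map_map]
    rw [List.filter_congr (q := fun k : Nat => decide ((raw.getD k []).length ≤ 3))
      (fun k _ => by simp [Function.comp_def, PySem.List.pyGetD_natCast])]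
    simp [Function.comp_def]
  rw [hkeys]
  have hmlen : nl.length ≤ (((List.range raw.length).filter
      (fun k => decide ((raw.getD k []).length ≤ 3))).map (fun k : Nat => pvKeyT (k : Int))).length :=
    hkklen ▸ hpre
  -- ---- B side: the zip has distinct fresh keys ----
  have hmapfst : List.map Prod.fst
      ((((List.range raw.length).filter (fun k => decide ((raw.getD k []).length ≤ 3))).map
        (fun k : Nat => pvKeyT (k : Int))).zip nl)
      = (((List.range raw.length).filter (fun k => decide ((raw.getD k []).length ≤ 3))).map
        (fun k : Nat => pvKeyT (k : Int))).take nl.length := by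
    refine List.ext_getElem ?_ ?_
    · simp [Nat.min_comm]
    · intro j h1 h2
      simp [List.getElem_zip, List.getElem_take]
  have hB := PySem.Dict.items_foldl_insert_fresh
      ((((List.range raw.length).filter (fun k => decide ((raw.getD k []).length ≤ 3))).map
        (fun k : Nat => pvKeyT (k : Int))).zip nl)
      Prod.fst Prod.snd PySem.Dict.empty
      (fun a _ => PySem.Dict.contains_empty _)
      (hmapfst ▸ (List.take_sublist _ _).nodup hkknd)
  simp only [PySem.Dict.ofList, PySem.Dict.update]
  rw [hB]
  rw [show (PySem.Dict.empty : PySem.Dict String (List String)).items = [] from rfl, List.nil_append]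
  -- ---- A side: the final insert loop has distinct fresh keys ----
  have hAmap : (PySem.List.pyRange 0 (nl.length : Int)).map
      (fun k => (PySem.List.pyGetD
        (List.map (fun k : Nat => (pvKeyT (k : Int), raw.getD k []))
          (List.filter (fun k => decide ((raw.getD k []).length ≤ 3)) (List.range raw.length)))
        k ("", [])).1)
      = (((List.range raw.length).filter (fun k => decide ((raw.getD k []).length ≤ 3))).map
        (fun k : Nat => pvKeyT (k : Int))).take nl.length := by
    rw [PySem.List.pyRange_zero_natCast, List.map_map]
    refine List.ext_getElem ?_ ?_
    · have h := hmlen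
      simp only [List.length_map] at h
      simp only [List.length_map, List.length_range, List.length_take]
      omega
    · intro j h1 h2
      simp only [List.getElem_map, List.getElem_range, Function.comp_apply, List.getElem_take]
      rw [PySem.List.pyGetD_natCast]
      rw [List.getD_eq_getElem _ _ (by
        simp only [List.length_map]
        have := hmlen
        simp only [List.length_map] at this
        simp only [List.length_map, List.length_range] at h1
        omega)]
      simp only [List.getElem_map]
  have hA := PySem.Dict.items_foldl_insert_fresh
      (PySem.List.pyRange 0 (nl.length : Int))
      (fun k => (PySem.List.pyGetD
        (List.map (fun k : Nat => (pvKeyT (k : Int), raw.getD k []))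
          (List.filter (fun k => decide ((raw.getD k []).length ≤ 3)) (List.range raw.length)))
        k ("", [])).1)
      (fun k => PySem.List.pyGetD nl k []) PySem.Dict.empty
      (fun a _ => PySem.Dict.contains_empty _)
      (hAmap ▸ (List.take_sublist _ _).nodup hkknd)
  simp only [hA]
  rw [show (PySem.Dict.empty : PySem.Dict String (List String)).items = [] from rfl, List.nil_append]
  -- ---- final: both are the zip ----
  rw [PySem.List.pyRange_zero_natCast, List.map_map]
  refine List.ext_getElem ?_ ?_
  · have h := hmlen
    simp only [List.length_map] at h
    simp only [List.length_map, List.length_range, List.length_zip]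
    omega
  · intro j h1 h2
    simp only [List.length_map, List.length_range] at h1
    have hjk : j < (List.filter (fun k => decide ((raw.getD k []).length ≤ 3)) (List.range raw.length)).length := by
      have h := hmlen
      simp only [List.length_map] at h
      omega
    simp only [List.getElem_map, List.getElem_range, Function.comp_apply, List.getElem_zip, Prod.mk.injEq]
    refine ⟨?_, ?_⟩
    · rw [PySem.List.pyGetD_natCast, List.getD_eq_getElem _ _ (by simpa using hjk)]
      simp [List.getElem_map]
    · rw [PySem.List.pyGetD_natCast, List.getD_eq_getElem _ _ h1]
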